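-- pv_equiv track=rewrite | github.com/olimiemma/ARC-Prize-2025-Kaggle-ARC-AGI-2-Benchmark- | arc_prize_2025_submission/kaggle_arc_solver_v3.py | block_reduce
-- ===== SOURCE A (Python) =====
-- from typing import Any, Dict, List, Tuple, Optional
--
-- Grid = List[List[int]]
--
-- def dims(g: Grid) -> Tuple[int, int]:
--     return (len(g), len(g[0]) if g else 0)
--
-- def block_reduce(g: Grid, hr: int, wr: int) -> Grid:
--     h, w = dims(g)
--     if hr <= 0 or wr <= 0: return g
--     if h % hr != 0 or w % wr != 0: return g
--     th, tw = h // hr, w // wr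
--     out: Grid = [[0 for _ in range(tw)] for _ in range(th)]
--     for br in range(th):
--         for bc in range(tw):
--             freq: Dict[int, int] = {}
--             for r in range(br * hr, (br + 1) * hr):
--                 for c in range(bc * wr, (bc + 1) * wr):
--                     v = g[r][c]; freq[v] = freq.get(v, 0) + 1
--             best, best_c = 0, 0
--             for color, cnt in freq.items():
--                 if cnt > best:
--                     best, best_c = cnt, color
--             out[br][bc] = best_c
--     return out
-- ===== SOURCE B (Python) =====
-- def block_reduce(g, hr, wr):
--     h = len(g)
--     w = len(g[0]) if g else 0
--     if hr <= 0 or wr <= 0 or h % hr != 0 or w % wr != 0: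
--         return g
--     # one flat row-major pass: a dict of per-block counters keyed by (br, bc)
--     freq = {}
--     for r in range(h):
--         for c in range(w):
--             key = (r // hr, c // wr)
--             d = freq.get(key, {})
--             v = g[r][c]
--             d[v] = d.get(v, 0) + 1
--             freq[key] = d
--     out = []
--     for br in range(h // hr):
--         row = []
--         for bc in range(w // wr):
--             best, best_c = 0, 0
--             for color, cnt in freq.get((br, bc), {}).items():
--                 if cnt > best:
--                     best, best_c = cnt, color
--             row.append(best_c)
--         out.append(row)
--     return out
-- ===== Notes on version B (the rewrite author's own statement) =====
-- stated objective: alternative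
-- what changed: Replaces A's per-block nested gather loops (re-visiting the grid block by block) with a single flat row-major pass that builds one dict of per-block frequency counters keyed by (r//hr, c//wr), followed by a separate argmax pass over the block table; the row-major scan feeds each block's counter in the same order as A, preserving the first-encountered tie-break.
import Mathlib
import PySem

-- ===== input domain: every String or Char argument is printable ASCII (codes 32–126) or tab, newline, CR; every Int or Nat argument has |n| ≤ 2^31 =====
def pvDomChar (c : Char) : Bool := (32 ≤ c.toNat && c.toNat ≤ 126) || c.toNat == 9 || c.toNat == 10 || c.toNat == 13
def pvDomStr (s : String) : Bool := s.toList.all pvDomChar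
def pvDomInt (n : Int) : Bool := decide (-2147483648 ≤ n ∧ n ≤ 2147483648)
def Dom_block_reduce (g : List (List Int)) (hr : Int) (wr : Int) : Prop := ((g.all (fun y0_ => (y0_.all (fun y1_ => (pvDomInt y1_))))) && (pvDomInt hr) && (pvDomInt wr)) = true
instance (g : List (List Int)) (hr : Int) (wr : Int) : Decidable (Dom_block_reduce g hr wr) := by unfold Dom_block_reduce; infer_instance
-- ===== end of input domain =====

-- B replaces A's block-by-block gather loops by ONE flat row-major pass building a dict of
-- per-block counters keyed by (r//hr, c//wr), then a separate argmax pass over that table;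
-- same value (the row-major scan feeds each counter in A's order), alternative decomposition.

-- ===== PORT A =====
def pvDims (g : List (List Int)) : Int × Int :=
  ((g.length : Int), if g = [] then 0 else ((PySem.List.pyGetD g 0 []).length : Int))

def block_reduce (g : List (List Int)) (hr : Int) (wr : Int) : List (List Int) :=
  let h := (pvDims g).1
  let w := (pvDims g).2
  if hr ≤ 0 ∨ wr ≤ 0 then g
  else if PySem.Int.mod h hr ≠ 0 ∨ PySem.Int.mod w wr ≠ 0 then g
  else
    let th := PySem.Int.floordiv h hr
    let tw := PySem.Int.floordiv w wr
    let out0 := (PySem.List.pyRange 0 th 1).map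
      (fun _ => (PySem.List.pyRange 0 tw 1).map (fun _ => (0 : Int)))
    (PySem.List.pyRange 0 th 1).foldl (fun out br =>
      (PySem.List.pyRange 0 tw 1).foldl (fun out bc =>
        let freq : PySem.Dict Int Int :=
          (PySem.List.pyRange (br * hr) ((br + 1) * hr) 1).foldl (fun d r =>
            (PySem.List.pyRange (bc * wr) ((bc + 1) * wr) 1).foldl (fun d c =>
              let v := PySem.List.pyGetD (PySem.List.pyGetD g r []) c 0
              d.insert v (d.getD v 0 + 1)) d) PySem.Dict.empty
        let p := freq.items.foldl (fun (p : Int × Int) kv =>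
          if kv.2 > p.1 then (kv.2, kv.1) else p) (0, 0)
        PySem.List.pySetD out br (PySem.List.pySetD (PySem.List.pyGetD out br []) bc p.2)) out) out0

-- ===== PORT B =====
-- B's flat row-major counting pass (the 'for r / for c' loops building freq)
def pvFreqB (g : List (List Int)) (hr wr h w : Int) : PySem.Dict (Int × Int) (PySem.Dict Int Int) :=
  (PySem.List.pyRange 0 h 1).foldl (fun t r =>
    (PySem.List.pyRange 0 w 1).foldl (fun t c =>
      let key := (PySem.Int.floordiv r hr, PySem.Int.floordiv c wr)
      let d := t.getD key PySem.Dict.empty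
      let v := PySem.List.pyGetD (PySem.List.pyGetD g r []) c 0
      t.insert key (d.insert v (d.getD v 0 + 1))) t) PySem.Dict.empty

def block_reduce_alt (g : List (List Int)) (hr : Int) (wr : Int) : List (List Int) :=
  let h : Int := g.length
  let w : Int := if g = [] then 0 else ((PySem.List.pyGetD g 0 []).length : Int)
  if hr ≤ 0 ∨ wr ≤ 0 ∨ PySem.Int.mod h hr ≠ 0 ∨ PySem.Int.mod w wr ≠ 0 then g
  else
    let freq : PySem.Dict (Int × Int) (PySem.Dict Int Int) := pvFreqB g hr wr h w
    (PySem.List.pyRange 0 (PySem.Int.floordiv h hr) 1).foldl (fun out br =>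
      out ++ [(PySem.List.pyRange 0 (PySem.Int.floordiv w wr) 1).foldl (fun row bc =>
        row ++ [((freq.getD (br, bc) PySem.Dict.empty).items.foldl
          (fun (p : Int × Int) kv => if kv.2 > p.1 then (kv.2, kv.1) else p) (0, 0)).2]) []]) []

-- ===== PRECONDITION & SPEC =====
-- Pre_ excludes exactly the inputs where A RAISES (IndexError): grids whose divisibility guards
-- pass but where some row is shorter than the first row (both versions index g[r][c] for c < len(g[0])).
def Pre_block_reduce (g : List (List Int)) (hr : Int) (wr : Int) : Prop :=
  (hr ≤ 0 ∨ wr ≤ 0 ∨ PySem.Int.mod (g.length : Int) hr ≠ 0 ∨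
    PySem.Int.mod ((g.headD []).length : Int) wr ≠ 0) ∨
  ∀ row ∈ g, (g.headD []).length ≤ row.length
instance (g : List (List Int)) (hr : Int) (wr : Int) : Decidable (Pre_block_reduce g hr wr) := by
  unfold Pre_block_reduce; infer_instance

def pvWitness_block_reduce : List (List Int) × Int × Int := ([[1, 2], [3, 4]], 1, 2)

def Spec_block_reduce (g : List (List Int)) (hr : Int) (wr : Int) (out : List (List Int)) : Prop :=
  out = block_reduce_alt g hr wr
instance (g : List (List Int)) (hr : Int) (wr : Int) (out : List (List Int)) :
    Decidable (Spec_block_reduce g hr wr out) := by unfold Spec_block_reduce; infer_instance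

-- ===== CLAIM (what is proved, stated in full; the proofs are below) =====
def Claim_equal_block_reduce : Prop := ∀ (g : List (List Int)) (hr : Int) (wr : Int),
  Dom_block_reduce g hr wr → Pre_block_reduce g hr wr →
  Spec_block_reduce g hr wr (block_reduce g hr wr)

-- ===== LEMMAS AND PROOFS =====

-- the cell sequence A's nested index loops read, in order
def pvCellsA (g : List (List Int)) (hr wr br bc : Int) : List Int :=
  (PySem.List.pyRange (br * hr) ((br + 1) * hr) 1).flatMap
    (fun r => (PySem.List.pyRange (bc * wr) ((bc + 1) * wr) 1).map
      (fun c => PySem.List.pyGetD (PySem.List.pyGetD g r []) c 0))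

-- A's nested frequency loops build the counter of that cell sequence
theorem pv_freq_eq (g : List (List Int)) (hr wr br bc : Int) :
    (PySem.List.pyRange (br * hr) ((br + 1) * hr) 1).foldl (fun d r =>
        (PySem.List.pyRange (bc * wr) ((bc + 1) * wr) 1).foldl (fun d c =>
          let v := PySem.List.pyGetD (PySem.List.pyGetD g r []) c 0
          d.insert v (d.getD v 0 + 1)) d) PySem.Dict.empty
      = PySem.Dict.counter (pvCellsA g hr wr br bc) := by
  rw [← PySem.Dict.foldl_insert_getD_add_one_eq_counter]
  unfold pvCellsA
  simp only [List.flatMap_def, List.foldl_flatten, List.foldl_map]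

-- B's key and cell-value functions on a flat (r, c) stream
def pvKey (hr wr : Int) (rc : Int × Int) : Int × Int :=
  (PySem.Int.floordiv rc.1 hr, PySem.Int.floordiv rc.2 wr)
def pvCell (g : List (List Int)) (rc : Int × Int) : Int :=
  PySem.List.pyGetD (PySem.List.pyGetD g rc.1 []) rc.2 0

-- the flat row-major stream of (r, c) coordinates B scans
def pvStream (h w : Int) : List (Int × Int) :=
  (PySem.List.pyRange 0 h 1).flatMap (fun r => (PySem.List.pyRange 0 w 1).map (fun c => (r, c)))

-- B's nested loops are the flat fold over that stream
theorem pv_freq_flat (g : List (List Int)) (hr wr h w : Int) :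
    pvFreqB g hr wr h w
      = (pvStream h w).foldl (fun t rc =>
          t.insert (pvKey hr wr rc) ((t.getD (pvKey hr wr rc) PySem.Dict.empty).insert
            (pvCell g rc) ((t.getD (pvKey hr wr rc) PySem.Dict.empty).getD (pvCell g rc) 0 + 1)))
          PySem.Dict.empty := by
  simp only [pvFreqB, pvStream, List.flatMap_def, List.foldl_flatten, List.foldl_map, pvKey, pvCell]

-- a lookup in a keyed-update fold sees exactly the updates of its own key, in stream order
theorem pv_getD_group (key : Int × Int → Int × Int) (val : Int × Int → Int) :
    ∀ (l : List (Int × Int)) (t : PySem.Dict (Int × Int) (PySem.Dict Int Int)) (k : Int × Int),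
    (l.foldl (fun t a =>
        t.insert (key a) ((t.getD (key a) PySem.Dict.empty).insert (val a)
          ((t.getD (key a) PySem.Dict.empty).getD (val a) 0 + 1))) t).getD k PySem.Dict.empty
      = (l.filter (fun a => decide (key a = k))).foldl
          (fun d a => d.insert (val a) (d.getD (val a) 0 + 1)) (t.getD k PySem.Dict.empty) := by
  intro l
  induction l with
  | nil => intro t k; simp
  | cons a l ih =>
    intro t k
    simp only [List.foldl_cons, List.filter_cons]
    by_cases hk : key a = k
    · rw [ih, if_pos (by simp [hk])]
      simp only [List.foldl_cons]
      rw [hk, PySem.Dict.getD_insert_self]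
    · rw [ih, if_neg (by simp [hk])]
      rw [PySem.Dict.getD_insert_of_ne _ _ _ (Ne.symm hk)]

-- filtering a 0-based range by its floor-quotient keeps exactly one aligned block
theorem pv_filter_pyRange (q b n : Int) (hq : 0 < q) (hb : 0 ≤ b) (hn : (b + 1) * q ≤ n) :
    (PySem.List.pyRange 0 n 1).filter (fun c => decide (PySem.Int.floordiv c q = b))
      = PySem.List.pyRange (b * q) ((b + 1) * q) 1 := by
  rw [PySem.List.pyRange_one_append 0 (b * q) n (by positivity) (by nlinarith),
      PySem.List.pyRange_one_append (b * q) ((b + 1) * q) n (by nlinarith) hn,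
      List.filter_append, List.filter_append]
  have h1 : (PySem.List.pyRange 0 (b * q) 1).filter
      (fun c => decide (PySem.Int.floordiv c q = b)) = [] := by
    apply List.filter_eq_nil_iff.mpr
    intro c hc
    obtain ⟨hc1, hc2⟩ := PySem.List.mem_pyRange_one.mp hc
    simp only [decide_eq_true_eq]
    intro he
    rw [PySem.Int.floordiv_eq_iff_of_pos hq] at he
    omega
  have h2 : (PySem.List.pyRange (b * q) ((b + 1) * q) 1).filter
      (fun c => decide (PySem.Int.floordiv c q = b))
      = PySem.List.pyRange (b * q) ((b + 1) * q) 1 := by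
    apply List.filter_eq_self.mpr
    intro c hc
    obtain ⟨hc1, hc2⟩ := PySem.List.mem_pyRange_one.mp hc
    simp only [decide_eq_true_eq]
    rw [PySem.Int.floordiv_eq_iff_of_pos hq]
    omega
  have h3 : (PySem.List.pyRange ((b + 1) * q) n 1).filter
      (fun c => decide (PySem.Int.floordiv c q = b)) = [] := by
    apply List.filter_eq_nil_iff.mpr
    intro c hc
    obtain ⟨hc1, hc2⟩ := PySem.List.mem_pyRange_one.mp hc
    simp only [decide_eq_true_eq]
    intro he
    rw [PySem.Int.floordiv_eq_iff_of_pos hq] at he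
    omega
  rw [h1, h2, h3, List.nil_append, List.append_nil]

-- filtering the flat stream by block key keeps exactly that block's cells, in row-major order
theorem pv_stream_filter (h w hr wr br bc : Int)
    (hhr : 0 < hr) (hwr : 0 < wr) (hbr : 0 ≤ br) (hbc : 0 ≤ bc)
    (h1 : (br + 1) * hr ≤ h) (h2 : (bc + 1) * wr ≤ w) :
    (pvStream h w).filter (fun rc => decide (pvKey hr wr rc = (br, bc)))
      = (PySem.List.pyRange (br * hr) ((br + 1) * hr) 1).flatMap
          (fun r => (PySem.List.pyRange (bc * wr) ((bc + 1) * wr) 1).map (fun c => (r, c))) := by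
  unfold pvStream
  rw [List.filter_flatMap]
  rw [PySem.List.pyRange_one_append 0 (br * hr) h (by positivity) (by nlinarith),
      PySem.List.pyRange_one_append (br * hr) ((br + 1) * hr) h (by nlinarith) h1,
      List.flatMap_append, List.flatMap_append]
  have hout : ∀ (r : Int), PySem.Int.floordiv r hr ≠ br →
      ((PySem.List.pyRange 0 w 1).map (fun c => (r, c))).filter
        (fun rc => decide (pvKey hr wr rc = (br, bc))) = [] := by
    intro r hne
    rw [List.filter_map]
    apply List.map_eq_nil_iff.mpr
    apply List.filter_eq_nil_iff.mpr
    intro c _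
    simp only [Function.comp, pvKey, decide_eq_true_eq, Prod.mk.injEq, not_and]
    intro he; exact absurd he hne
  have hn1 : (PySem.List.pyRange 0 (br * hr) 1).flatMap (fun r =>
      ((PySem.List.pyRange 0 w 1).map (fun c => (r, c))).filter
        (fun rc => decide (pvKey hr wr rc = (br, bc)))) = [] := by
    apply List.flatMap_eq_nil_iff.mpr
    intro r hrm
    obtain ⟨hr1, hr2⟩ := PySem.List.mem_pyRange_one.mp hrm
    apply hout
    intro he
    rw [PySem.Int.floordiv_eq_iff_of_pos hhr] at he
    omega
  have hn3 : (PySem.List.pyRange ((br + 1) * hr) h 1).flatMap (fun r =>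
      ((PySem.List.pyRange 0 w 1).map (fun c => (r, c))).filter
        (fun rc => decide (pvKey hr wr rc = (br, bc)))) = [] := by
    apply List.flatMap_eq_nil_iff.mpr
    intro r hrm
    obtain ⟨hr1, hr2⟩ := PySem.List.mem_pyRange_one.mp hrm
    apply hout
    intro he
    rw [PySem.Int.floordiv_eq_iff_of_pos hhr] at he
    omega
  rw [hn1, hn3, List.nil_append, List.append_nil]
  apply List.flatMap_congr
  intro r hrm
  obtain ⟨hr1, hr2⟩ := PySem.List.mem_pyRange_one.mp hrm
  have hre : PySem.Int.floordiv r hr = br := by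
    rw [PySem.Int.floordiv_eq_iff_of_pos hhr]; omega
  rw [List.filter_map]
  have hpred : ∀ c ∈ PySem.List.pyRange 0 w 1,
      ((fun rc => decide (pvKey hr wr rc = (br, bc))) ∘ (fun c => (r, c))) c
        = (fun c => decide (PySem.Int.floordiv c wr = bc)) c := by
    intro c _
    simp [Function.comp, pvKey, hre]
  rw [List.filter_congr hpred, pv_filter_pyRange wr bc w hwr hbc h2]

-- B's table lookup at a valid block is the counter of A's cell sequence for that block
theorem pv_tbl_block (g : List (List Int)) (h w hr wr br bc : Int)
    (hhr : 0 < hr) (hwr : 0 < wr) (hbr : 0 ≤ br) (hbc : 0 ≤ bc)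
    (h1 : (br + 1) * hr ≤ h) (h2 : (bc + 1) * wr ≤ w) :
    ((pvStream h w).foldl (fun t rc =>
        t.insert (pvKey hr wr rc) ((t.getD (pvKey hr wr rc) PySem.Dict.empty).insert
          (pvCell g rc) ((t.getD (pvKey hr wr rc) PySem.Dict.empty).getD (pvCell g rc) 0 + 1)))
        PySem.Dict.empty).getD (br, bc) PySem.Dict.empty
      = PySem.Dict.counter (pvCellsA g hr wr br bc) := by
  rw [pv_getD_group (pvKey hr wr) (pvCell g) (pvStream h w) PySem.Dict.empty (br, bc)]
  rw [pv_stream_filter h w hr wr br bc hhr hwr hbr hbc h1 h2]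
  rw [PySem.Dict.getD_empty]
  have hmap : ((PySem.List.pyRange (br * hr) ((br + 1) * hr) 1).flatMap
      (fun r => (PySem.List.pyRange (bc * wr) ((bc + 1) * wr) 1).map (fun c => (r, c)))).map
        (pvCell g) = pvCellsA g hr wr br bc := by
    unfold pvCellsA
    rw [List.map_flatMap]
    apply List.flatMap_congr
    intro r _
    simp [List.map_map, Function.comp, pvCell]
  rw [← hmap, ← PySem.Dict.foldl_insert_getD_add_one_eq_counter, List.foldl_map]

-- an index loop of writes r[i] = F(r[i], i) maps F over the written prefix
theorem pv_foldl_set_gen {α : Type} (d : α) (G : List α → Nat → List α) (F : α → Nat → α)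
    (hG : ∀ (r : List α) (i : Nat), i < r.length → G r i = r.set i (F (r.getD i d) i)) :
    ∀ (n : Nat) (row : List α), n ≤ row.length →
    (List.range n).foldl G row = (List.range n).map (fun i => F (row.getD i d) i) ++ row.drop n := by
  intro n
  induction n with
  | zero => simp
  | succ n ih =>
    intro row hn
    rw [List.range_succ, List.foldl_append, List.map_append, ih row (by omega)]
    have hlt : n < row.length := by omega
    have hmap : ((List.range n).map (fun i => F (row.getD i d) i)).length = n := by simp
    simp only [List.foldl_cons, List.foldl_nil]
    rw [hG _ n (by simp; omega)]
    rw [List.getD_append_right _ _ _ _ (by omega), hmap, Nat.sub_self]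
    have hdrop : row.drop n = row[n] :: row.drop (n+1) := List.drop_eq_getElem_cons hlt
    rw [List.set_append_right _ _ (by omega), hmap, Nat.sub_self, hdrop, List.set_cons_zero]
    have h0 : (row[n] :: row.drop (n+1)).getD 0 d = row.getD n d := by
      simp [List.getD_eq_getElem?_getD, List.getElem?_eq_getElem hlt]
    rw [h0]
    simp [List.getD_eq_getElem?_getD, List.getElem?_eq_getElem hlt]

-- the inner column loop only rewrites row k: it factors through one outer set
theorem pv_fold_set_row (k : Nat) (f : Nat → Int) : ∀ (n : Nat) (o : List (List Int)), k < o.length →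
    (List.range n).foldl (fun o j => o.set k ((o.getD k []).set j (f j))) o
      = o.set k ((List.range n).foldl (fun r j => r.set j (f j)) (o.getD k [])) := by
  intro n
  induction n with
  | zero => intro o hk; simp [List.getElem?_eq_getElem hk, List.set_getElem_self]
  | succ n ih =>
    intro o hk
    rw [List.range_succ, List.foldl_append, ih o hk]
    simp only [List.foldl_cons, List.foldl_nil, List.foldl_append]
    have hget : (o.set k ((List.range n).foldl (fun r j => r.set j (f j)) (o.getD k []))).getD k []
        = (List.range n).foldl (fun r j => r.set j (f j)) (o.getD k []) := by
      simp [List.getD_eq_getElem?_getD, hk]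
    rw [hget, List.set_set]

-- the doubly indexed write loop over the zero grid produces the map-of-maps grid
theorem pv_grid_eq (pick : Nat -> Nat -> Int) (th tw : Nat) :
    (List.range th).foldl (fun out k => (List.range tw).foldl
      (fun out j => out.set k ((out.getD k []).set j (pick k j))) out)
      ((List.range th).map (fun _ => (List.range tw).map (fun _ => (0:Int))))
    = (List.range th).map (fun k => (List.range tw).map (fun j => pick k j)) := by
  rw [pv_foldl_set_gen ([] : List Int)
      (fun out k => (List.range tw).foldl (fun out j => out.set k ((out.getD k []).set j (pick k j))) out)
      (fun row k => (List.range tw).foldl (fun r j => r.set j (pick k j)) row)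
      (fun r i hi => pv_fold_set_row i (pick i) tw r hi) th _ (by simp)]
  rw [List.drop_of_length_le (by simp), List.append_nil]
  apply List.map_congr_left
  intro k hk
  have hzero : ((List.range th).map (fun _ => (List.range tw).map (fun _ => (0:Int)))).getD k []
      = (List.range tw).map (fun _ => (0:Int)) := by
    simp [List.getD_eq_getElem?_getD, List.mem_range.mp hk]
  rw [hzero]
  rw [pv_foldl_set_gen (0 : Int)
      (fun r j => r.set j (pick k j)) (fun _ j => pick k j)
      (fun r i hi => rfl) tw _ (by simp)]
  rw [List.drop_of_length_le (by simp), List.append_nil]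

theorem block_reduce_spec : Claim_equal_block_reduce := by
  intro g hr wr _ hpre
  unfold Spec_block_reduce
  simp only [block_reduce, block_reduce_alt, pvDims]
  by_cases hg1 : hr <= 0  ∨  wr <= 0
  . rw [if_pos hg1, if_pos (by tauto)]
  rw [if_neg hg1]
  have hhr : 0 < hr := by omega
  have hwr : 0 < wr := by omega
  have hw : (if g = [] then (0:Int) else ((PySem.List.pyGetD g 0 []).length : Int))
      = ((g.headD []).length : Int) := by
    cases g <;> simp [PySem.List.pyGetD_zero_cons]
  rw [hw]
  by_cases hg2 : PySem.Int.mod ((g.length : Nat) : Int) hr ≠ 0  ∨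
      PySem.Int.mod (((g.headD []).length : Nat) : Int) wr ≠ 0
  . rw [if_pos hg2, if_pos (Or.inr (Or.inr hg2))]
  rw [if_neg hg2, if_neg (by tauto : Not (hr <= 0  ∨  wr <= 0  ∨
    PySem.Int.mod ((g.length : Nat) : Int) hr ≠ 0  ∨
    PySem.Int.mod (((g.headD []).length : Nat) : Int) wr ≠ 0))]
  have hmh : PySem.Int.mod ((g.length : Nat) : Int) hr = 0 := by
    by_contra hc; exact hg2 (Or.inl hc)
  have hmw : PySem.Int.mod (((g.headD []).length : Nat) : Int) wr = 0 := by
    by_contra hc; exact hg2 (Or.inr hc)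
  obtain ⟨hrN, rfl⟩ : ∃ n : Nat, hr = ((n : Nat) : Int) := ⟨hr.toNat, by omega⟩
  obtain ⟨wrN, rfl⟩ : ∃ n : Nat, wr = ((n : Nat) : Int) := ⟨wr.toNat, by omega⟩
  have hhrN : 0 < hrN := by exact_mod_cast hhr
  have hwrN : 0 < wrN := by exact_mod_cast hwr
  have hdvd1 : hrN ∣ g.length := by
    rw [PySem.Int.mod_natCast] at hmh
    exact Nat.dvd_of_mod_eq_zero (by exact_mod_cast hmh)
  have hdvd2 : wrN ∣ (g.headD []).length := by
    rw [PySem.Int.mod_natCast] at hmw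
    exact Nat.dvd_of_mod_eq_zero (by exact_mod_cast hmw)
  rw [pv_freq_flat]
  rw [PySem.Int.floordiv_natCast, PySem.Int.floordiv_natCast]
  simp only [PySem.List.pyRange_zero_natCast, List.foldl_map, List.map_map, Function.comp_def,
    PySem.List.pySetD_natCast, PySem.List.pyGetD_natCast, pv_freq_eq,
    PySem.List.foldl_append_singleton_eq_map, List.nil_append]
  refine Eq.trans (pv_grid_eq _ _ _) ?_
  apply List.map_congr_left
  intro k hk
  apply List.map_congr_left
  intro j hj
  have hk' : k < g.length / hrN := List.mem_range.mp hk
  have hj' : j < (g.headD []).length / wrN := List.mem_range.mp hj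
  have h3N : (k + 1) * hrN  ≤  g.length := by
    have h1 := Nat.mul_le_mul_right hrN (Nat.succ_le_of_lt hk')
    rwa [Nat.div_mul_cancel hdvd1] at h1
  have h6N : (j + 1) * wrN  ≤  (g.headD []).length := by
    have h1 := Nat.mul_le_mul_right wrN (Nat.succ_le_of_lt hj')
    rwa [Nat.div_mul_cancel hdvd2] at h1
  rw [pv_tbl_block g ((g.length : Nat) : Int) (((g.headD []).length : Nat) : Int)
      ((hrN : Nat) : Int) ((wrN : Nat) : Int) ((k : Nat) : Int) ((j : Nat) : Int)
      (by exact_mod_cast hhrN) (by exact_mod_cast hwrN) (by positivity) (by positivity)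
      (by exact_mod_cast h3N) (by exact_mod_cast h6N)]
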